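-- pv_equiv track=rewrite | github.com/Artemis21/aoc22 | aoc22_py/day_18.py | sa_of_scan
-- ===== SOURCE A (Python) =====
-- def sa_of_scan(scan: list[tuple[int, int, int]]) -> int:
--     """Get the surface area (interior and exterior) of a scan."""
--     # [ (x, y, z, plane) ] where:
--     #    x, y and z are the low-end coordinates of the side
--     #    plane is 0, 1 or 2 for xy, xz or yz
--     sides: set[tuple[int, int, int, int]] = set()
--     for x, y, z in scan:
--         cube_sides = [
--             (x, y, z, 0),
--             (x, y, z, 1),
--             (x, y, z, 2),
--             (x + 1, y, z, 2),
--             (x, y + 1, z, 1),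
--             (x, y, z + 1, 0),
--         ]
--         for side in cube_sides:
--             if side in sides:
--                 sides.remove(side)
--             else:
--                 sides.add(side)
--     return len(sides)
-- ===== SOURCE B (Python) =====
-- def sa_of_scan(scan: list[tuple[int, int, int]]) -> int:
--     """Get the surface area (interior and exterior) of a scan."""
--     faces = []
--     for x, y, z in scan:
--         faces += [
--             (x, y, z, 0),
--             (x, y, z, 1),
--             (x, y, z, 2),
--             (x + 1, y, z, 2),
--             (x, y + 1, z, 1),
--             (x, y, z + 1, 0),
--         ]
--     faces.sort()
--     total = 0
--     i = 0
--     n = len(faces)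
--     while i < n:
--         j = i + 1
--         while j < n and faces[j] == faces[i]:
--             j += 1
--         if (j - i) % 2 == 1:
--             total += 1
--         i = j
--     return total
-- ===== Notes on version B (the rewrite author's own statement) =====
-- stated objective: alternative
-- what changed: Replaces A's incremental toggle-a-set-of-faces loop by a three-phase pipeline: flatten all six faces of every cube into one list, sort it, then scan it once counting maximal runs of equal faces of odd length (parity, so duplicate cubes cancel exactly as A's toggle does).
import Mathlib
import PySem

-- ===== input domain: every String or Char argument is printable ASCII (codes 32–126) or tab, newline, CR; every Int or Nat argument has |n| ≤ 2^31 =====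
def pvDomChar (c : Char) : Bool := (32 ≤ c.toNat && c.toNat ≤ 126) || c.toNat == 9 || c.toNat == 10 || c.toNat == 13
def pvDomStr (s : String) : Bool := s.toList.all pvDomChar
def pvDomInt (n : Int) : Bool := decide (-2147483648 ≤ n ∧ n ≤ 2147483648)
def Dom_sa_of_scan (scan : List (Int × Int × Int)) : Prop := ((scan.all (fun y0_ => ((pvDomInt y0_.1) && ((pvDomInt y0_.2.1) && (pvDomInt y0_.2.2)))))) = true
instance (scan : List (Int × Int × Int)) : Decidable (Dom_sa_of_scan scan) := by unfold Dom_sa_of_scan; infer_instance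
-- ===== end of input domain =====

-- B replaces A's toggle-a-set-of-faces loop by flatten-all-faces, sort, and count odd-length runs
-- (objective: alternative decomposition; same exact value, duplicate cubes still cancel by parity).

-- ===== PORT A =====
-- 'if side in sides: sides.remove(side) else: sides.add(side)'; under the membership guard
-- Python's set.remove cannot raise, so it is PySem.Set.discard here (exact).
def sa_of_scan (scan : List (Int × Int × Int)) : Int :=
  let sides : PySem.Set (Int × Int × Int × Int) :=
    scan.foldl (fun sides c =>
      ([(c.1, c.2.1, c.2.2, 0), (c.1, c.2.1, c.2.2, 1), (c.1, c.2.1, c.2.2, 2),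
       (c.1 + 1, c.2.1, c.2.2, 2), (c.1, c.2.1 + 1, c.2.2, 1), (c.1, c.2.1, c.2.2 + 1, 0)]).foldl (fun s side =>
        if PySem.Set.contains s side then PySem.Set.discard s side else PySem.Set.add s side) sides)
      PySem.Set.empty
  (sides.length : Int)

-- ===== PORT B =====
-- the six faces of one cube, the same six side tuples as A
def pvFaces (x y z : Int) : List (Int × Int × Int × Int) :=
  [(x, y, z, 0), (x, y, z, 1), (x, y, z, 2),
   (x + 1, y, z, 2), (x, y + 1, z, 1), (x, y, z + 1, 0)]

-- Python's tuple comparison for faces.sort(): lexicographic strict less-than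
def pvLexLt (a b : Int × Int × Int × Int) : Bool :=
  decide (a.1 < b.1 ∨ (a.1 = b.1 ∧ (a.2.1 < b.2.1 ∨ (a.2.1 = b.2.1 ∧
    (a.2.2.1 < b.2.2.1 ∨ (a.2.2.1 = b.2.2.1 ∧ a.2.2.2 < b.2.2.2))))))

-- B's run-scan over the sorted face list: +1 for every maximal run of equal faces of odd length
def pvCountRuns : List (Int × Int × Int × Int) → Int
  | [] => 0
  | x :: xs =>
    (if (xs.takeWhile (fun y => y == x)).length % 2 = 0 then 1 else 0)
      + pvCountRuns (xs.dropWhile (fun y => y == x))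
termination_by l => l.length
decreasing_by
  simp only [List.length_cons]
  exact Nat.lt_succ_of_le (List.length_dropWhile_le _ _)

def sa_of_scan_alt (scan : List (Int × Int × Int)) : Int :=
  let faces := scan.foldl (fun acc c => acc ++ pvFaces c.1 c.2.1 c.2.2) []
  -- faces.sort(): Python's stable sort == left fold of ordered insertion by tuple '<'
  let sortedFaces := faces.foldl (fun acc f => PySem.List.insertBy pvLexLt f acc) []
  pvCountRuns sortedFaces

-- ===== PRECONDITION & SPEC =====
def Spec_sa_of_scan (scan : List (Int × Int × Int)) (out : Int) : Prop := out = sa_of_scan_alt scan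
instance (scan : List (Int × Int × Int)) (out : Int) : Decidable (Spec_sa_of_scan scan out) := by unfold Spec_sa_of_scan; infer_instance

-- ===== CLAIM (what is proved, stated in full; the proofs are below) =====
def Claim_equal_sa_of_scan : Prop := ∀ (scan : List (Int × Int × Int)), Dom_sa_of_scan scan → Spec_sa_of_scan scan (sa_of_scan scan)

-- ===== LEMMAS AND PROOFS =====

-- number of distinct face values occurring an odd number of times in l
def pvOddCard (l : List (Int × Int × Int × Int)) : Nat :=
  (l.toFinset.filter (fun v => l.count v % 2 = 1)).card

-- 'a ≤ b' for the sort order: b is not lexicographically below a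
def pvRle (a b : Int × Int × Int × Int) : Prop := pvLexLt b a = false

-- ordering facts about pvLexLt
theorem pvLex_asymm {a b : Int × Int × Int × Int} (h : pvLexLt a b = true) : pvLexLt b a = false := by
  obtain ⟨a1, a2, a3, a4⟩ := a; obtain ⟨b1, b2, b3, b4⟩ := b
  simp only [pvLexLt, decide_eq_true_eq, decide_eq_false_iff_not] at *
  omega

theorem pvLex_total {a b : Int × Int × Int × Int} (h1 : pvLexLt a b = false) (h2 : pvLexLt b a = false) : a = b := by
  obtain ⟨a1, a2, a3, a4⟩ := a; obtain ⟨b1, b2, b3, b4⟩ := b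
  simp only [pvLexLt, decide_eq_false_iff_not] at *
  simp only [Prod.mk.injEq]
  omega

theorem pvRle_trans {a b c : Int × Int × Int × Int} (h1 : pvRle a b) (h2 : pvRle b c) : pvRle a c := by
  obtain ⟨a1, a2, a3, a4⟩ := a; obtain ⟨b1, b2, b3, b4⟩ := b; obtain ⟨c1, c2, c3, c4⟩ := c
  simp only [pvRle, pvLexLt, decide_eq_false_iff_not] at *
  omega

-- the toggle loop of A: membership in the set after the fold is parity of the count
theorem pvToggle_mem (l : List (Int × Int × Int × Int)) :
    ∀ (s : PySem.Set (Int × Int × Int × Int)), s.Nodup →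
      (l.foldl (fun s side => if PySem.Set.contains s side then PySem.Set.discard s side else PySem.Set.add s side) s).Nodup ∧
      (∀ v, v ∈ l.foldl (fun s side => if PySem.Set.contains s side then PySem.Set.discard s side else PySem.Set.add s side) s ↔
        ((v ∈ s ∧ l.count v % 2 = 0) ∨ (v ∉ s ∧ l.count v % 2 = 1))) := by
  induction l with
  | nil => intro s hs; simpa using hs
  | cons x l ih =>
    intro s hs
    simp only [List.foldl_cons]
    have hcont : PySem.Set.contains s x = true ↔ x ∈ s := by
      simp [PySem.Set.contains]
    have hnodup' : (if PySem.Set.contains s x then PySem.Set.discard s x else PySem.Set.add s x).Nodup := by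
      by_cases h : PySem.Set.contains s x = true
      · simp only [h, if_true]
        exact PySem.Set.nodup_discard _ _ hs
      · simp only [Bool.not_eq_true] at h
        simp only [h, Bool.false_eq_true, if_false]
        exact PySem.Set.nodup_add _ _ hs
    obtain ⟨hN, hM⟩ := ih _ hnodup'
    refine ⟨hN, fun v => ?_⟩
    rw [hM v]
    by_cases hx : x ∈ s
    · have h : PySem.Set.contains s x = true := hcont.mpr hx
      simp only [h, if_true, PySem.Set.mem_discard]
      by_cases hvx : v = x
      · subst hvx; simp [List.count_cons_self, hx]; omega
      · simp [hvx, Ne.symm hvx]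
    · have h : PySem.Set.contains s x = false := by
        rcases Bool.eq_false_or_eq_true (PySem.Set.contains s x) with h | h
        · exact absurd (hcont.mp h) hx
        · exact h
      simp only [h, Bool.false_eq_true, if_false, PySem.Set.mem_add]
      by_cases hvx : v = x
      · subst hvx; simp [List.count_cons_self, hx]; omega
      · simp [hvx, Ne.symm hvx]

-- A's result is the number of distinct faces with odd multiplicity
theorem pvA_eq_oddCard (faces : List (Int × Int × Int × Int)) :
    (faces.foldl (fun s side => if PySem.Set.contains s side then PySem.Set.discard s side else PySem.Set.add s side) PySem.Set.empty).length = pvOddCard faces := by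
  obtain ⟨hN, hM⟩ := pvToggle_mem faces PySem.Set.empty (by simp [PySem.Set.empty])
  rw [← List.toFinset_card_of_nodup hN]
  unfold pvOddCard
  congr 1
  ext v
  have hemp : ∀ w : Int × Int × Int × Int, w ∉ (PySem.Set.empty : PySem.Set (Int × Int × Int × Int)) := by
    intro w hw
    simp [PySem.Set.empty] at hw
  have hv := hM v
  simp only [hemp v, false_and, false_or, not_false_iff, true_and] at hv
  rw [List.mem_toFinset, hv, Finset.mem_filter, List.mem_toFinset]
  constructor
  · intro hodd
    have hpos : 0 < faces.count v := by omega
    exact ⟨List.count_pos_iff.mp hpos, hodd⟩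
  · exact fun h => h.2

-- the insertion fold of B is a permutation of its input
theorem pvSort_perm (l : List (Int × Int × Int × Int)) :
    ∀ acc, (l.foldl (fun acc f => PySem.List.insertBy pvLexLt f acc) acc).Perm (l ++ acc) := by
  induction l with
  | nil => intro acc; simp
  | cons x l ih =>
    intro acc
    simp only [List.foldl_cons, List.cons_append]
    exact ((ih _).trans ((PySem.List.insertBy_perm pvLexLt x acc).append_left l)).trans
      List.perm_middle

theorem pvInsertBy_pairwise {x : Int × Int × Int × Int} {l : List (Int × Int × Int × Int)}
    (h : l.Pairwise pvRle) : (PySem.List.insertBy pvLexLt x l).Pairwise pvRle := by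
  induction l with
  | nil => simp [PySem.List.insertBy]
  | cons y ys ih =>
    simp only [PySem.List.insertBy]
    by_cases hxy : pvLexLt x y = true
    · simp only [hxy, if_true]
      refine List.Pairwise.cons ?_ h
      intro z hz
      rcases List.mem_cons.mp hz with rfl | hz
      · exact pvLex_asymm hxy
      · exact pvRle_trans (pvLex_asymm hxy) (List.rel_of_pairwise_cons h hz)
    · simp only [hxy]
      refine List.Pairwise.cons ?_ (ih (List.Pairwise.of_cons h))
      intro z hz
      rcases (PySem.List.mem_insertBy pvLexLt x z ys).mp hz with rfl | hz
      · simpa [pvRle] using hxy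
      · exact List.rel_of_pairwise_cons h hz

theorem pvSort_pairwise (l : List (Int × Int × Int × Int)) :
    ∀ acc, acc.Pairwise pvRle → (l.foldl (fun acc f => PySem.List.insertBy pvLexLt f acc) acc).Pairwise pvRle := by
  induction l with
  | nil => intro acc h; simpa using h
  | cons x l ih =>
    intro acc h
    simp only [List.foldl_cons]
    exact ih _ (pvInsertBy_pairwise h)

-- oddCard is invariant under permutation
theorem pvOddCard_perm {l1 l2 : List (Int × Int × Int × Int)} (h : l1.Perm l2) :
    pvOddCard l1 = pvOddCard l2 := by
  unfold pvOddCard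
  rw [List.toFinset_eq_of_perm _ _ h]
  congr 1
  exact Finset.filter_congr (fun v _ => by rw [h.count_eq])

-- the head of a dropWhile fails the predicate
theorem pvDropWhile_head {α : Type} (p : α → Bool) (l : List α) (y : α) (t : List α)
    (h : l.dropWhile p = y :: t) : p y = false := by
  induction l with
  | nil => simp at h
  | cons a l ih =>
    by_cases ha : p a = true
    · rw [List.dropWhile_cons_of_pos ha] at h; exact ih h
    · rw [List.dropWhile_cons_of_neg ha] at h
      cases h; simpa using ha

-- the run scan on a sorted list counts the distinct values of odd multiplicity
theorem pvCountRuns_eq_oddCard (l : List (Int × Int × Int × Int)) (h : l.Pairwise pvRle) :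
    pvCountRuns l = (pvOddCard l : Int) := by
  revert h
  induction l using pvCountRuns.induct with
  | case1 => intro _; simp [pvCountRuns, pvOddCard]
  | case2 x xs ih =>
    intro h
    have hx : ∀ z ∈ xs, pvRle x z := fun z hz => List.rel_of_pairwise_cons h hz
    have hxs : xs.Pairwise pvRle := List.Pairwise.of_cons h
    set run := xs.takeWhile (fun y => y == x) with hrun
    set rest := xs.dropWhile (fun y => y == x) with hrest
    have hsplit : run ++ rest = xs := List.takeWhile_append_dropWhile
    have hrunx : ∀ y ∈ run, y = x := by
      intro y hy
      have h1 := List.mem_takeWhile_imp (hrun ▸ hy)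
      simpa using h1
    have hrestpw : rest.Pairwise pvRle := hxs.sublist (List.dropWhile_sublist _)
    have hxrest : x ∉ rest := by
      intro hmem
      cases hr : rest with
      | nil => rw [hr] at hmem; simp at hmem
      | cons y t =>
        have hy : (y == x) = false := pvDropWhile_head _ xs y t (hrest ▸ hr)
        have hyx : y ≠ x := by simpa using hy
        have hymem : y ∈ xs := by
          rw [← hsplit, hr]; simp
        rcases List.mem_cons.mp (hr ▸ hmem) with rfl | hxt
        · exact hyx rfl
        · -- x occurs later in rest: y ≤ x and x ≤ y force y = x
          have h1 : pvRle y x := List.rel_of_pairwise_cons (hr ▸ hrestpw) hxt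
          have h2 : pvRle x y := hx y hymem
          exact hyx (pvLex_total h1 h2).symm
    have hcount_run : run.count x = run.length := by
      rw [List.count_eq_length]
      intro y hy
      simpa using (hrunx y hy).symm
    have hcount_rest_x : rest.count x = 0 := List.count_eq_zero.mpr hxrest
    have hcx : (x :: xs).count x = run.length + 1 := by
      rw [List.count_cons_self, ← hsplit, List.count_append, hcount_run, hcount_rest_x]
    have hcv : ∀ v, v ≠ x → (x :: xs).count v = rest.count v := by
      intro v hv
      have h0 : run.count v = 0 := List.count_eq_zero.mpr (fun hm => hv (hrunx v hm))
      rw [← hsplit]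
      simp [List.count_append, h0, Ne.symm hv]
    have hfin : (x :: xs).toFinset = insert x rest.toFinset := by
      ext v
      simp only [List.toFinset_cons, Finset.mem_insert, List.mem_toFinset, ← hsplit,
        List.mem_append]
      constructor
      · rintro (rfl | hv | hv)
        · exact Or.inl rfl
        · exact Or.inl (hrunx v hv)
        · exact Or.inr hv
      · rintro (rfl | hv)
        · exact Or.inl rfl
        · exact Or.inr (Or.inr hv)
    have hxfin : x ∉ rest.toFinset := by simpa using hxrest
    have hfilter :
        rest.toFinset.filter (fun v => (x :: xs).count v % 2 = 1) =
        rest.toFinset.filter (fun v => rest.count v % 2 = 1) := by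
      apply Finset.filter_congr
      intro v hv
      have hvne : v ≠ x := fun hvx => hxfin (hvx ▸ hv)
      simp [hcv v hvne]
    have hodd : pvOddCard (x :: xs) =
        (if run.length % 2 = 0 then 1 else 0) + pvOddCard rest := by
      unfold pvOddCard
      rw [hfin, Finset.filter_insert, hfilter]
      by_cases hpar : run.length % 2 = 0
      · have : (x :: xs).count x % 2 = 1 := by rw [hcx]; omega
        rw [if_pos this, if_pos hpar,
          Finset.card_insert_of_notMem (fun hm => hxfin (Finset.mem_of_mem_filter _ hm))]
        omega
      · have : ¬ (x :: xs).count x % 2 = 1 := by rw [hcx]; omega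
        rw [if_neg this, if_neg hpar, Nat.zero_add]
    rw [pvCountRuns, ← hrun, ← hrest, hodd, ih hrestpw]
    push_cast
    split_ifs <;> ring

-- A's nested loop over the per-cube face lists is the toggle loop over the flattened face list
theorem pvNested_eq_flat (scan : List (Int × Int × Int)) :
    ∀ init : PySem.Set (Int × Int × Int × Int),
      scan.foldl (fun sides c => ([(c.1, c.2.1, c.2.2, 0), (c.1, c.2.1, c.2.2, 1), (c.1, c.2.1, c.2.2, 2),
       (c.1 + 1, c.2.1, c.2.2, 2), (c.1, c.2.1 + 1, c.2.2, 1), (c.1, c.2.1, c.2.2 + 1, 0)]).foldl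
          (fun s side => if PySem.Set.contains s side then PySem.Set.discard s side else PySem.Set.add s side) sides) init
        = (scan.flatMap fun c => pvFaces c.1 c.2.1 c.2.2).foldl
          (fun s side => if PySem.Set.contains s side then PySem.Set.discard s side else PySem.Set.add s side) init := by
  induction scan with
  | nil => intro init; simp
  | cons c scan ih =>
    intro init
    simp only [List.foldl_cons, List.flatMap_cons, List.foldl_append]
    exact ih _

-- ===== VERDICT (by name: the statement is the Claim_ definition above) =====
theorem sa_of_scan_spec : Claim_equal_sa_of_scan := by
  intro scan _
  unfold Spec_sa_of_scan sa_of_scan sa_of_scan_alt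
  simp only [PySem.List.foldl_append_eq_flatMap, List.nil_append]
  rw [pvNested_eq_flat]
  generalize List.flatMap (fun c => pvFaces c.1 c.2.1 c.2.2) scan = fl
  have hperm := pvSort_perm fl []
  rw [List.append_nil] at hperm
  rw [pvA_eq_oddCard, pvCountRuns_eq_oddCard _ (pvSort_pairwise fl [] List.Pairwise.nil),
    pvOddCard_perm hperm]
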